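-- pv_equiv track=rewrite | github.com/raghav515/E-Yantra | Task 3/PB_Task3A_Ubuntu/task_3a.py | paths_to_moves
-- ===== SOURCE A (Python) =====
-- def paths_to_moves(paths, traffic_signal):
--
-- 	"""
-- 	Purpose:
-- 	---
-- 	This function takes the list of all nodes produces from the path planning algorithm
-- 	and connecting both start and end nodes
--
-- 	Input Arguments:
-- 	---
-- 	`paths` :	[ list of all nodes ]
-- 			list of all nodes connecting both start and end nodes (SHORTEST PATH)
-- 	`traffic_signal` : [ list of all traffic signals ]
-- 			list of all traffic signals
-- 	---
-- 	`moves` : [ list of moves from start to end nodes ]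
-- 			list containing moves for the bot to move from start to end
--
-- 			Eg. : ['UP', 'LEFT', 'UP', 'UP', 'RIGHT', 'DOWN']
--
-- 	Example call:
-- 	---
-- 	moves = paths_to_moves(paths, traffic_signal)
-- 	"""
--
-- 	list_moves=[]
--
-- 	##############	ADD YOUR CODE HERE	##############
--
-- 	orientation = 0
-- 	for i in range(0,len(paths)-1):
-- 		if paths[i][0] == paths[i+1][0]:
-- 			if paths[i][1] > paths[i+1][1]:
-- 				if orientation == 0:
-- 					list_moves.append('STRAIGHT')
-- 				elif orientation == 1:
-- 					list_moves.append('LEFT')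
-- 				elif orientation == 2:
-- 					list_moves.append('REVERSE')
-- 				elif orientation == 3:
-- 					list_moves.append('RIGHT')
-- 				orientation = 0
-- 			elif paths[i][1] < paths[i+1][1]:
-- 				if orientation == 0:
-- 					list_moves.append('REVERSE')
-- 				elif orientation == 1:
-- 					list_moves.append('RIGHT')
-- 				elif orientation == 2:
-- 					list_moves.append('STRAIGHT')
-- 				elif orientation == 3:
-- 					list_moves.append('LEFT')
-- 				orientation = 2
-- 		elif paths[i][1] == paths[i+1][1]:
-- 			if paths[i][0] < paths[i+1][0]:
-- 				if orientation == 0: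
-- 					list_moves.append('RIGHT')
-- 				elif orientation == 1:
-- 					list_moves.append('STRAIGHT')
-- 				elif orientation == 2:
-- 					list_moves.append('LEFT')
-- 				elif orientation == 3:
-- 					list_moves.append('REVERSE')
-- 				orientation = 1
-- 			elif paths[i][0] > paths[i+1][0]:
-- 				if orientation == 0:
-- 					list_moves.append('LEFT')
-- 				elif orientation == 1:
-- 					list_moves.append('REVERSE')
-- 				elif orientation == 2:
-- 					list_moves.append('RIGHT')
-- 				elif orientation == 3:
-- 					list_moves.append('STRAIGHT')
-- 				orientation = 3
-- 		if paths[i+1] in traffic_signal: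
-- 			list_moves.append('WAIT_5')
--
-- 	##################################################
--
-- 	return list_moves
-- ===== SOURCE B (Python) =====
-- MOVES = ['STRAIGHT', 'RIGHT', 'REVERSE', 'LEFT']
--
--
-- def _direction(p, q):
--     # absolute heading of the step p -> q, or None if p == q or the step is diagonal
--     if p[0] == q[0] and p[1] > q[1]:
--         return 0
--     if p[0] == q[0] and p[1] < q[1]:
--         return 2
--     if p[1] == q[1] and p[0] < q[0]:
--         return 1
--     if p[1] == q[1] and p[0] > q[0]:
--         return 3
--     return None
--
--
-- def paths_to_moves(paths, traffic_signal):
--     # staged passes, no running orientation state: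
--     # 1) heading of every consecutive pair
--     pairs = list(zip(paths, paths[1:]))
--     dirs = [_direction(p, q) for p, q in pairs]
--     # 2) incoming orientation of step i = last realized heading before i (0 initially)
--     pre = [next((d for d in reversed(dirs[:i]) if d is not None), 0)
--            for i in range(len(dirs))]
--     # 3) per-pair output segments, flattened
--     segments = [
--         ([] if d is None else [MOVES[(d - b) % 4]]) +
--         (['WAIT_5'] if q in traffic_signal else [])
--         for ((p, q), d, b) in zip(pairs, dirs, pre)
--     ]
--     return [m for seg in segments for m in seg]
-- ===== Notes on version B (the rewrite author's own statement) =====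
-- stated objective: alternative
-- what changed: Replaces A's single-pass 16-branch orientation state machine by stateless staged passes: first map each consecutive pair to its absolute heading (or None), then compute each step's incoming orientation by looking back for the last realized heading, then build per-pair move segments from a 4-element table indexed by (heading - incoming) % 4 and flatten them.
import Mathlib
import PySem

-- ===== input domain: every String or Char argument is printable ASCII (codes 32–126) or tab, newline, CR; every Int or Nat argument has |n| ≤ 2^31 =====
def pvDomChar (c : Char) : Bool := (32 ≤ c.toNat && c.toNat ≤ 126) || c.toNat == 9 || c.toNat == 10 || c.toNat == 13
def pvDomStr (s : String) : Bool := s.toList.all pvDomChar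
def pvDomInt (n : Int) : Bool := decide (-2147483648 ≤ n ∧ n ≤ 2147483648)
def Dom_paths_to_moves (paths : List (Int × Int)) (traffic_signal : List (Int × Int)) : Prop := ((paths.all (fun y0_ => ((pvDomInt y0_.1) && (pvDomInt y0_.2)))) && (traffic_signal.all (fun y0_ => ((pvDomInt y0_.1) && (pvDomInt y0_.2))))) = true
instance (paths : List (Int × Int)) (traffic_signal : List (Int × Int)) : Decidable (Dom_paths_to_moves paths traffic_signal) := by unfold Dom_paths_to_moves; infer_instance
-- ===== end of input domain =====

-- B replaces A's single-pass orientation state machine by stateless staged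
-- passes (pair headings, look-back incoming orientations, flattened segments);
-- objective: alternative decomposition, same return value.

-- ===== PORT A =====
-- A's loop body for one index i: p = paths[i], q = paths[i+1]; the nested
-- if/elif chains are transliterated branch for branch (an unmatched
-- orientation appends nothing, exactly as A's elif chain).
def pvPairA (traffic_signal : List (Int × Int)) (st : List String × Int)
    (pq : (Int × Int) × (Int × Int)) : List String × Int :=
  let p := pq.1
  let q := pq.2
  let lm := st.1
  let o := st.2
  let st' : List String × Int :=
    if p.1 = q.1 then
      if p.2 > q.2 then
        (lm ++ (if o = 0 then ["STRAIGHT"] else if o = 1 then ["LEFT"]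
                else if o = 2 then ["REVERSE"] else if o = 3 then ["RIGHT"] else []), 0)
      else if p.2 < q.2 then
        (lm ++ (if o = 0 then ["REVERSE"] else if o = 1 then ["RIGHT"]
                else if o = 2 then ["STRAIGHT"] else if o = 3 then ["LEFT"] else []), 2)
      else (lm, o)
    else if p.2 = q.2 then
      if p.1 < q.1 then
        (lm ++ (if o = 0 then ["RIGHT"] else if o = 1 then ["STRAIGHT"]
                else if o = 2 then ["LEFT"] else if o = 3 then ["REVERSE"] else []), 1)
      else if p.1 > q.1 then
        (lm ++ (if o = 0 then ["LEFT"] else if o = 1 then ["REVERSE"]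
                else if o = 2 then ["RIGHT"] else if o = 3 then ["STRAIGHT"] else []), 3)
      else (lm, o)
    else (lm, o)
  (if q ∈ traffic_signal then st'.1 ++ ["WAIT_5"] else st'.1, st'.2)

-- for i in range(0, len(paths)-1): paths[i] / paths[i+1] are always in range
-- there, so List.getD with a dummy default is exact.
def pvBodyA (paths traffic_signal : List (Int × Int)) (st : List String × Int)
    (i : Nat) : List String × Int :=
  pvPairA traffic_signal st (paths.getD i (0, 0), paths.getD (i + 1) (0, 0))

def paths_to_moves (paths : List (Int × Int)) (traffic_signal : List (Int × Int)) : List String :=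
  ((List.range (paths.length - 1)).foldl (pvBodyA paths traffic_signal) ([], 0)).1

-- ===== PORT B =====
def pvMOVES : List String := ["STRAIGHT", "RIGHT", "REVERSE", "LEFT"]

-- _direction(p, q): absolute heading of the step, None for identical/diagonal
def pvDirection (p q : Int × Int) : Option Int :=
  if p.1 = q.1 ∧ p.2 > q.2 then some 0
  else if p.1 = q.1 ∧ p.2 < q.2 then some 2
  else if p.2 = q.2 ∧ p.1 < q.1 then some 1
  else if p.2 = q.2 ∧ p.1 > q.1 then some 3
  else none

-- next((d for d in reversed(dirs[:i]) if d is not None), 0)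
def pvLookback (l : List (Option Int)) : Int :=
  (l.reverse.findSome? id).getD 0

-- one segment of stage 3: the move (if any) then the WAIT_5 (if any)
def pvSeg (traffic_signal : List (Int × Int)) (q : Int × Int)
    (d : Option Int) (b : Int) : List String :=
  (match d with
   | none => []
   | some dd => [PySem.List.pyGetD pvMOVES (PySem.Int.mod (dd - b) 4) ""]) ++
  (if q ∈ traffic_signal then ["WAIT_5"] else [])

def paths_to_moves_alt (paths : List (Int × Int)) (traffic_signal : List (Int × Int)) : List String :=
  let pairs := paths.zip (PySem.List.slice paths (some 1) none)
  let dirs := pairs.map (fun pq => pvDirection pq.1 pq.2)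
  let pre := (List.range dirs.length).map (fun i => pvLookback (dirs.take i))
  ((pairs.zip (dirs.zip pre)).map (fun x => pvSeg traffic_signal x.1.2 x.2.1 x.2.2)).flatten

-- ===== PRECONDITION & SPEC =====
def Spec_paths_to_moves (paths : List (Int × Int)) (traffic_signal : List (Int × Int)) (out : List String) : Prop := out = paths_to_moves_alt paths traffic_signal
instance (paths : List (Int × Int)) (traffic_signal : List (Int × Int)) (out : List String) : Decidable (Spec_paths_to_moves paths traffic_signal out) := by unfold Spec_paths_to_moves; infer_instance

-- ===== CLAIM (what is proved, stated in full; the proofs are below) =====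
def Claim_equal_paths_to_moves : Prop := ∀ (paths : List (Int × Int)) (traffic_signal : List (Int × Int)), Dom_paths_to_moves paths traffic_signal → Spec_paths_to_moves paths traffic_signal (paths_to_moves paths traffic_signal)

-- ===== LEMMAS AND PROOFS =====

-- B's stage-2/3 output over a pair list, generalized over the default
-- orientation shown to steps with no realized heading before them
def pvBGen (ts : List (Int × Int)) (prs : List ((Int × Int) × (Int × Int))) (o : Int) : List String :=
  let dirs := prs.map (fun pq => pvDirection pq.1 pq.2)
  let pre := (List.range dirs.length).map (fun i => ((dirs.take i).reverse.findSome? id).getD o)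
  ((prs.zip (dirs.zip pre)).map (fun x => pvSeg ts x.1.2 x.2.1 x.2.2)).flatten

-- the index list of A's loop maps to exactly the adjacent pairs B zips
lemma pvPairs_eq : ∀ (xs : List (Int × Int)),
    (List.range (xs.length - 1)).map (fun i => (xs.getD i (0, 0), xs.getD (i + 1) (0, 0)))
      = xs.zip (xs.tail)
  | [] => by simp
  | [_] => by simp
  | a :: b :: t => by
      have ih := pvPairs_eq (b :: t)
      simp only [List.length_cons, Nat.add_sub_cancel, List.range_succ_eq_map,
        List.map_cons, List.map_map, List.tail_cons, List.zip_cons_cons] at *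
      refine congrArg (_ :: ·) ?_
      simpa using ih

-- pvBGen unfolds one pair at a time
lemma pvBGen_cons (ts : List (Int × Int)) (pq : (Int × Int) × (Int × Int))
    (prs : List ((Int × Int) × (Int × Int))) (o : Int) :
    pvBGen ts (pq :: prs) o =
      pvSeg ts pq.2 (pvDirection pq.1 pq.2) o ++
        pvBGen ts prs ((pvDirection pq.1 pq.2).getD o) := by
  simp only [pvBGen, List.map_cons, List.length_cons, List.range_succ_eq_map,
    List.map_map, List.take_zero, List.reverse_nil, List.findSome?_nil,
    Option.getD_none, List.zip_cons_cons, List.flatten_cons]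
  refine congrArg (pvSeg ts pq.2 (pvDirection pq.1 pq.2) o ++ ·) ?_
  refine congrArg List.flatten ?_
  refine congrArg (fun l => (prs.zip ((List.map (fun pq => pvDirection pq.1 pq.2) prs).zip l)).map
    (fun x => pvSeg ts x.1.2 x.2.1 x.2.2)) ?_
  refine List.map_congr_left ?_
  intro i _
  simp only [Function.comp, List.take_succ_cons, List.reverse_cons,
    List.findSome?_append, List.findSome?_cons, id_eq]
  cases h : ((List.map (fun pq => pvDirection pq.1 pq.2) prs).take i).reverse.findSome? id <;>
    cases hd : pvDirection pq.1 pq.2 <;> simp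

-- A's one step, rewritten through B's segment, for orientations 0..3
set_option maxHeartbeats 1000000 in
lemma pvStep_eq (ts : List (Int × Int)) (lm : List String) (o : Int)
    (pq : (Int × Int) × (Int × Int)) (h : o = 0 ∨ o = 1 ∨ o = 2 ∨ o = 3) :
    pvPairA ts (lm, o) pq =
      (lm ++ pvSeg ts pq.2 (pvDirection pq.1 pq.2) o,
       (pvDirection pq.1 pq.2).getD o) := by
  obtain ⟨⟨p1, p2⟩, q1, q2⟩ := pq
  rcases h with h | h | h | h <;> subst h <;>
    simp only [pvPairA, pvSeg, pvDirection] <;>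
    split_ifs <;> first | rfl | omega | (simp_all <;> decide)

-- the A-fold from any valid orientation equals the accumulated list followed
-- by B's staged output with that orientation as default
lemma pvFold_eq (ts : List (Int × Int)) :
    ∀ (prs : List ((Int × Int) × (Int × Int))) (lm : List String) (o : Int),
      (o = 0 ∨ o = 1 ∨ o = 2 ∨ o = 3) →
      (prs.foldl (pvPairA ts) (lm, o)).1 = lm ++ pvBGen ts prs o
  | [], lm, o, _ => by simp [pvBGen]
  | pq :: prs, lm, o, h => by
      have ho : (pvDirection pq.1 pq.2).getD o = 0 ∨ (pvDirection pq.1 pq.2).getD o = 1 ∨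
          (pvDirection pq.1 pq.2).getD o = 2 ∨ (pvDirection pq.1 pq.2).getD o = 3 := by
        unfold pvDirection; split_ifs <;> simp_all
      rw [List.foldl_cons, pvStep_eq ts lm o pq h, pvBGen_cons,
        pvFold_eq ts prs _ _ ho, List.append_assoc]

-- ===== VERDICT (by name: the statement is the Claim_ definition above) =====
theorem paths_to_moves_spec : Claim_equal_paths_to_moves := by
  intro paths ts _
  show paths_to_moves paths ts = paths_to_moves_alt paths ts
  unfold paths_to_moves paths_to_moves_alt
  rw [PySem.List.slice_from_one]
  have e1 : List.foldl (pvBodyA paths ts) ([], 0) (List.range (paths.length - 1))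
      = List.foldl (pvPairA ts) (([] : List String), (0 : Int))
        ((List.range (paths.length - 1)).map
          (fun i => (paths.getD i (0, 0), paths.getD (i + 1) (0, 0)))) := by
    rw [List.foldl_map]; rfl
  rw [e1, pvPairs_eq paths, pvFold_eq ts _ [] 0 (Or.inl rfl)]
  simp [pvBGen, pvLookback]
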